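-- pv_equiv track=rewrite | github.com/Atomic-Panda/Introduction_to_NLP | nsp.py | sent_to_seg
-- ===== SOURCE A (Python) =====
-- def sent_to_seg(x, y):
--     # 根据 x, y 向量得到一个句子的分词结果
--     cache = ''
--     words = []
--     for i in range(len(x)):
--         if y[i] == 1 and cache != '':
--             words.append(cache)
--             cache = ''
--         cache += x[i]
--     words.append(cache)
--     return words
-- ===== SOURCE B (Python) =====
-- def sent_to_seg(x, y):
--     # boundary-index decomposition: collect split positions first, then slice
--     bounds = [i for i in range(len(x)) if y[i] == 1]
--     words = []
--     start = 0
--     for b in bounds: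
--         seg = ''.join(x[start:b])
--         if seg:
--             words.append(seg)
--         start = b
--     words.append(''.join(x[start:]))
--     return words
-- ===== Notes on version B (the rewrite author's own statement) =====
-- stated objective: alternative
-- what changed: Instead of one character-accumulating loop with a cache string, B first collects the boundary indices where y[i]==1 and then joins the slices between consecutive boundaries with a start cursor.
import Mathlib
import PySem

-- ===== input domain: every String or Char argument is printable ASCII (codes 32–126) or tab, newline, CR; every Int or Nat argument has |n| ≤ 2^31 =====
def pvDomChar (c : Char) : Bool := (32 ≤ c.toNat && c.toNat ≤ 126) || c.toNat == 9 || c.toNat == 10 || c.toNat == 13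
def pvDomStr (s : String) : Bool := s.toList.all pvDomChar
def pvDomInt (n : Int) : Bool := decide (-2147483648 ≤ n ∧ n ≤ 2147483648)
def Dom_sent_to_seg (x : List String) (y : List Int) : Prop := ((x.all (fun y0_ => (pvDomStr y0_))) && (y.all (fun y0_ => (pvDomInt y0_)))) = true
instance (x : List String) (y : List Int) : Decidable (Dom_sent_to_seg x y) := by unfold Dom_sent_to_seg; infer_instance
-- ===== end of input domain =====

-- B replaces A's character-accumulating cache loop by a boundary-index pass followed by slice joins; same cost, different decomposition.

-- ===== PORT A =====
-- literal transliteration of A: cache/words state threaded through 'for i in range(len(x))'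
def sent_to_seg (x : List String) (y : List Int) : List String :=
  let r := (PySem.List.pyRange 0 (PySem.List.len x) 1).foldl
    (fun (st : String × List String) i =>
      let st' :=
        if PySem.List.pyGetD y i 0 == 1 && st.1 ≠ "" then ("", st.2 ++ [st.1]) else st
      (st'.1 ++ PySem.List.pyGetD x i "", st'.2))
    ("", [])
  r.2 ++ [r.1]

-- ===== PORT B =====
-- literal transliteration of B: boundary indices first, then a cursor loop joining slices
def sent_to_seg_alt (x : List String) (y : List Int) : List String :=
  let bounds := (PySem.List.pyRange 0 (PySem.List.len x) 1).filter
    (fun i => PySem.List.pyGetD y i 0 == 1)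
  let r := bounds.foldl
    (fun (st : List String × Int) b =>
      let seg := PySem.Str.join "" (PySem.List.slice x (some st.2) (some b))
      (if seg ≠ "" then st.1 ++ [seg] else st.1, b))
    ([], 0)
  r.1 ++ [PySem.Str.join "" (PySem.List.slice x (some r.2) none)]

-- ===== PRECONDITION & SPEC =====
-- Pre_: Python A raises IndexError (y[i]) as soon as x is longer than y; it returns on all other inputs.
def Pre_sent_to_seg (x : List String) (y : List Int) : Prop := x.length ≤ y.length
instance (x : List String) (y : List Int) : Decidable (Pre_sent_to_seg x y) := by unfold Pre_sent_to_seg; infer_instance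

def pvWitness_sent_to_seg : List String × List Int := (["a", "b", "c"], [0, 1, 0])

def Spec_sent_to_seg (x : List String) (y : List Int) (out : List String) : Prop := out = sent_to_seg_alt x y
instance (x : List String) (y : List Int) (out : List String) : Decidable (Spec_sent_to_seg x y out) := by unfold Spec_sent_to_seg; infer_instance

-- ===== CLAIM (what is proved, stated in full; the proofs are below) =====
def Claim_equal_sent_to_seg : Prop := ∀ (x : List String) (y : List Int), Dom_sent_to_seg x y → Pre_sent_to_seg x y → Spec_sent_to_seg x y (sent_to_seg x y)

-- ===== LEMMAS AND PROOFS =====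

-- common recursive specification: segment x by the (aligned) flags in y, carrying the cache
def segRec : List String → List Int → String → List String
  | [], _, c => [c]
  | a :: t, ys, c =>
      if ys.headD 0 = 1 ∧ c ≠ "" then c :: segRec t ys.tail a
      else segRec t ys.tail (c ++ a)

theorem join_empty_cons (a : String) (l : List String) :
    PySem.Str.join "" (a :: l) = a ++ PySem.Str.join "" l := by
  cases l with
  | nil => simp [PySem.Str.join]
  | cons b t => simp [PySem.Str.join, PySem.Chars.join_cons_cons]

theorem join_empty_append_singleton (l : List String) (a : String) :
    PySem.Str.join "" (l ++ [a]) = PySem.Str.join "" l ++ a := by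
  induction l with
  | nil => simp [PySem.Str.join, PySem.Chars.join, List.intercalate]
  | cons b t ih => simp only [List.cons_append, join_empty_cons, ih, String.append_assoc]

-- A's loop from index k equals segRec on the suffixes
theorem loopA (x : List String) (y : List Int) (hy : x.length ≤ y.length) (k : Nat)
    (hk : k ≤ x.length) (c : String) (w : List String) :
    (let r := (PySem.List.pyRange (k : Int) (PySem.List.len x) 1).foldl
        (fun (st : String × List String) i =>
          let st' :=
            if PySem.List.pyGetD y i 0 == 1 && st.1 ≠ "" then ("", st.2 ++ [st.1]) else st
          (st'.1 ++ PySem.List.pyGetD x i "", st'.2))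
        (c, w);
      r.2 ++ [r.1]) = w ++ segRec (x.drop k) (y.drop k) c := by
  induction h : x.length - k generalizing k c w with
  | zero =>
    have hke : k = x.length := by omega
    subst hke
    rw [PySem.List.pyRange_one_eq_nil (by simp)]
    simp [segRec]
  | succ n ih =>
    have hklt : k < x.length := by omega
    have hky : k < y.length := by omega
    rw [PySem.List.pyRange_one_cons (by simp; omega)]
    simp only [List.foldl_cons]
    have hx : PySem.List.pyGetD x (k : Int) "" = x[k] := by
      rw [PySem.List.pyGetD_natCast]; exact List.getD_eq_getElem _ _ hklt
    have hyk : PySem.List.pyGetD y (k : Int) 0 = y[k] := by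
      rw [PySem.List.pyGetD_natCast]; exact List.getD_eq_getElem _ _ hky
    have hdx : x.drop k = x[k] :: x.drop (k + 1) := List.drop_eq_getElem_cons hklt
    have hdy : y.drop k = y[k] :: y.drop (k + 1) := List.drop_eq_getElem_cons hky
    have hopt : y[k]? = some y[k] := List.getElem?_eq_getElem hky
    have hcast : (k : Int) + 1 = ((k + 1 : Nat) : Int) := by push_cast; ring
    rw [hcast]
    by_cases h1 : y[k] = 1 <;> by_cases h2 : c = ""
    · subst h2
      simp only [hx, hyk, h1, beq_self_eq_true, ne_eq, not_true_eq_false, decide_false,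
        Bool.and_false]
      rw [ih (k + 1) (by omega) _ _ (by omega)]
      rw [hdx, hdy]
      simp [segRec, hopt, String.empty_append]
    · simp only [hx, hyk, h1, beq_self_eq_true, ne_eq, h2, not_false_eq_true, decide_true,
        Bool.and_true]
      rw [ih (k + 1) (by omega) _ _ (by omega)]
      rw [hdx, hdy]
      simp [segRec, h1, h2, String.empty_append]
    · subst h2
      have : (PySem.List.pyGetD y (k:Int) 0 == 1 && decide (("":String) ≠ "")) = false := by
        simp
      simp only [this, Bool.false_eq_true]
      rw [ih (k + 1) (by omega) _ _ (by omega)]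
      rw [hdx, hdy]
      simp [segRec, hopt, hx, String.empty_append]
    · have : (PySem.List.pyGetD y (k:Int) 0 == 1 && decide (c ≠ "")) = false := by
        simp [hyk, h1]
      simp only [this, Bool.false_eq_true, ite_false]
      rw [ih (k + 1) (by omega) _ _ (by omega)]
      rw [hdx, hdy]
      simp [segRec, hopt, h1, hx]

-- B's loop from index k with cursor s equals segRec on the suffixes
theorem loopB (x : List String) (y : List Int) (hy : x.length ≤ y.length) (k s : Nat)
    (hs : s ≤ k) (hk : k ≤ x.length) (w : List String) :
    (let r := ((PySem.List.pyRange (k : Int) (PySem.List.len x) 1).filter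
        (fun i => PySem.List.pyGetD y i 0 == 1)).foldl
        (fun (st : List String × Int) b =>
          let seg := PySem.Str.join "" (PySem.List.slice x (some st.2) (some b))
          (if seg ≠ "" then st.1 ++ [seg] else st.1, b))
        (w, (s : Int));
      r.1 ++ [PySem.Str.join "" (PySem.List.slice x (some r.2) none)])
      = w ++ segRec (x.drop k) (y.drop k) (PySem.Str.join "" ((x.drop s).take (k - s))) := by
  induction h : x.length - k generalizing k s w with
  | zero =>
    have hke : k = x.length := by omega
    subst hke
    rw [PySem.List.pyRange_one_eq_nil (by simp)]
    simp only [List.filter_nil, List.foldl_nil]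
    rw [PySem.List.slice_from_natCast]
    have : (x.drop s).take (x.length - s) = x.drop s := by
      apply List.take_of_length_le; simp
    rw [this]
    simp [segRec, PySem.Str.join, PySem.Chars.join, List.intercalate]
  | succ n ih =>
    have hklt : k < x.length := by omega
    have hky : k < y.length := by omega
    rw [PySem.List.pyRange_one_cons (by simp; omega)]
    have hyk : PySem.List.pyGetD y (k : Int) 0 = y[k] := by
      rw [PySem.List.pyGetD_natCast]; exact List.getD_eq_getElem _ _ hky
    have hdx : x.drop k = x[k] :: x.drop (k + 1) := List.drop_eq_getElem_cons hklt
    have hdy : y.drop k = y[k] :: y.drop (k + 1) := List.drop_eq_getElem_cons hky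
    have hopt : y[k]? = some y[k] := List.getElem?_eq_getElem hky
    have htake1 : (x.drop k).take (k + 1 - k) = [x[k]] := by
      rw [show k + 1 - k = 1 from by omega, hdx]
      rfl
    have hjoin1 : PySem.Str.join "" ((x.drop k).take (k + 1 - k)) = x[k] := by
      rw [htake1]
      simp [PySem.Str.join, PySem.Chars.join, List.intercalate]
    have htakes : (x.drop s).take (k + 1 - s) = (x.drop s).take (k - s) ++ [x[k]] := by
      have hlen : k - s < (x.drop s).length := by simp; omega
      have : (x.drop s)[k - s] = x[k] := by
        rw [List.getElem_drop]; congr 1; omega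
      have hsucc : k + 1 - s = (k - s) + 1 := by omega
      rw [hsucc, List.take_add_one, List.getElem?_eq_getElem hlen, this]
      rfl
    by_cases h1 : y[k] = 1
    · have hp : (PySem.List.pyGetD y (k:Int) 0 == 1) = true := by simp [hyk, h1]
      rw [List.filter_cons]
      simp only [hp, if_true, List.foldl_cons]
      rw [PySem.List.slice_natCast]
      set seg := PySem.Str.join "" ((x.drop s).take (k - s)) with hseg
      have hcast : (k : Int) + 1 = ((k + 1 : Nat) : Int) := by push_cast; ring
      by_cases h2 : seg = ""
      · simp only [h2, ne_eq, not_true_eq_false, ite_false]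
        rw [hcast, ih (k + 1) k (by omega) (by omega) _ (by omega)]
        rw [hjoin1, hdx, hdy]
        simp [segRec, h1]
      · simp only [ne_eq, h2, not_false_eq_true, ite_true]
        rw [hcast, ih (k + 1) k (by omega) (by omega) _ (by omega)]
        rw [hjoin1, hdx, hdy]
        simp [segRec, h1, h2]
    · have hp : (PySem.List.pyGetD y (k:Int) 0 == 1) = false := by simp [hyk, h1]
      rw [List.filter_cons, if_neg (by simp only [beq_iff_eq, hyk]; exact h1)]
      have hcast : (k : Int) + 1 = ((k + 1 : Nat) : Int) := by push_cast; ring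
      rw [hcast, ih (k + 1) s (by omega) (by omega) _ (by omega)]
      rw [htakes, join_empty_append_singleton, hdx, hdy]
      simp [segRec, hopt, h1]

-- ===== VERDICT (by name: the statement is the Claim_ definition above) =====
theorem sent_to_seg_spec : Claim_equal_sent_to_seg := by
  intro x y _ hpre
  unfold Spec_sent_to_seg sent_to_seg sent_to_seg_alt
  have hA := loopA x y hpre 0 (Nat.zero_le _) "" []
  have hB := loopB x y hpre 0 0 le_rfl (Nat.zero_le _) []
  simp only [Nat.cast_zero, List.drop_zero, Nat.sub_zero, List.take_zero, List.nil_append] at hA hB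
  exact hA.trans hB.symm
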